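-- pv_equiv track=rewrite | github.com/caronido/investment-memo-agent | src/integrations/google_docs.py | _process_inline_formatting
-- ===== SOURCE A (Python) =====
-- def _process_inline_formatting(text: str) -> tuple[str, list[tuple[int, int]]]:
--     """Strip **bold** markers and return clean text with bold ranges.
--
--     Args:
--         text: Text potentially containing **bold** markers.
--
--     Returns:
--         Tuple of (clean_text, list of (start, end) index ranges for bold).
--     """
--     bold_ranges: list[tuple[int, int]] = []
--     clean = ""
--     i = 0
--     chars = list(text)
--     n = len(chars)
--
--     while i < n:
--         if i < n - 1 and chars[i] == "*" and chars[i + 1] == "*":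
--             # Found opening **
--             bold_start = len(clean)
--             i += 2
--             # Find closing **
--             while i < n - 1:
--                 if chars[i] == "*" and chars[i + 1] == "*":
--                     bold_ranges.append((bold_start, len(clean)))
--                     i += 2
--                     break
--                 clean += chars[i]
--                 i += 1
--             else:
--                 # No closing ** found, just add remaining
--                 if i < n:
--                     clean += chars[i]
--                     i += 1
--         else:
--             clean += chars[i]
--             i += 1
--
--     return clean, bold_ranges
-- ===== SOURCE B (Python) =====
-- def _process_inline_formatting(text: str) -> tuple[str, list[tuple[int, int]]]:
--     """Strip **bold** markers using str.find and slicing instead of a char loop."""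
--     bold_ranges: list[tuple[int, int]] = []
--     parts: list[str] = []
--     clean_len = 0
--     pos = 0
--     while True:
--         open_ = text.find("**", pos)
--         if open_ == -1:
--             parts.append(text[pos:])
--             break
--         parts.append(text[pos:open_])
--         clean_len += open_ - pos
--         close = text.find("**", open_ + 2)
--         if close == -1:
--             parts.append(text[open_ + 2:])
--             break
--         parts.append(text[open_ + 2:close])
--         bold_ranges.append((clean_len, clean_len + (close - open_ - 2)))
--         clean_len += close - open_ - 2
--         pos = close + 2
--     return "".join(parts), bold_ranges
-- ===== Notes on version B (the rewrite author's own statement) =====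
-- stated objective: faster
-- what changed: Replaces A's char-by-char index loop (with a nested inner scan and per-char string concatenation) by a pos-based loop that locates each opening and closing double-star delimiter with str.find, appends whole slices to a parts list joined once, and computes ranges from slice lengths.
import Mathlib
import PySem

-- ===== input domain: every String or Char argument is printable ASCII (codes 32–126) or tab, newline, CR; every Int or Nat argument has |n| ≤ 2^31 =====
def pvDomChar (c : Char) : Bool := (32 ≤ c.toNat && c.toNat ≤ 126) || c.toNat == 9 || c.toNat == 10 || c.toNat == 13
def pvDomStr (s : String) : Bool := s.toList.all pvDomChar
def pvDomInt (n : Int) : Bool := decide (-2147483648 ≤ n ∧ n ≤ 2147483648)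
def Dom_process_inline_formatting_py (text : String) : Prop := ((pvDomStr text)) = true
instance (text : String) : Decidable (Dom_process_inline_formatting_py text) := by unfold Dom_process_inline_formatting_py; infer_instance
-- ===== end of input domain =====

-- B replaces A's char-by-char index loop (per-char string +=) by a find-delimiter-and-slice loop; a timing run measured B faster.

-- ===== PORT A =====
-- A's inner "find closing **" while-loop: while at least two chars remain, check for
-- "**"; else append the char. The Python while-else tail ("if i < n: clean += chars[i]")
-- is the [c] case. Returns (clean', remaining chars, close-found flag).
def pvAInner : List Char → List Char → (List Char × List Char × Bool)
  | c :: c2 :: rest, clean =>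
      if c = '*' ∧ c2 = '*' then (clean, rest, true)
      else pvAInner (c2 :: rest) (clean ++ [c])
  | [c], clean => (clean ++ [c], [], false)
  | [], clean => (clean, [], false)

theorem pvAInner_rest_le : ∀ (cs clean : List Char), (pvAInner cs clean).2.1.length ≤ cs.length
  | c :: c2 :: rest, clean => by
      simp only [pvAInner]; split_ifs with h
      · simp; omega
      · have := pvAInner_rest_le (c2 :: rest) (clean ++ [c]); simp at this ⊢; omega
  | [c], clean => by simp [pvAInner]
  | [], clean => by simp [pvAInner]

-- A's outer while-loop over the remaining chars, accumulating clean and bold_ranges.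
def pvAOuter : List Char → List Char → List (Int × Int) → List Char × List (Int × Int)
  | c :: c2 :: rest, clean, ranges =>
      if c = '*' ∧ c2 = '*' then
        match hi : pvAInner rest clean with
        | (clean', rest', true) =>
            pvAOuter rest' clean' (ranges ++ [((clean.length : Int), (clean'.length : Int))])
        | (clean', _, false) => (clean', ranges)
      else pvAOuter (c2 :: rest) (clean ++ [c]) ranges
  | [c], clean, ranges => pvAOuter [] (clean ++ [c]) ranges
  | [], clean, ranges => (clean, ranges)
termination_by cs _ _ => cs.length
decreasing_by
  · have := pvAInner_rest_le rest clean
    rw [hi] at this; simp at this ⊢; omega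
  · simp
  · simp

def process_inline_formatting_py (text : String) : String × (List (Int × Int)) :=
  let r := pvAOuter text.toList [] []
  (String.ofList r.1, r.2)

-- ===== PORT B =====
-- text.find("**", pos): index of the first "**" in the given suffix (none = Python -1).
def pvFindDD : List Char → Option Nat
  | c :: c2 :: rest =>
      if c = '*' ∧ c2 = '*' then some 0
      else (pvFindDD (c2 :: rest)).map (· + 1)
  | [_] => none
  | [] => none

theorem pvFindDD_bound : ∀ (cs : List Char) (o : Nat), pvFindDD cs = some o → o + 2 ≤ cs.length
  | c :: c2 :: rest, o => by
      simp only [pvFindDD]; split_ifs with h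
      · intro h'; simp at h' ⊢; omega
      · intro h'; simp at h'; obtain ⟨k, hk, rfl⟩ := h'
        have := pvFindDD_bound (c2 :: rest) k hk
        simp at this ⊢; omega
  | [c], o => by intro h; simp [pvFindDD] at h
  | [], o => by intro h; simp [pvFindDD] at h

-- B's while-loop: locate the opening and closing "**" with find, append whole slices
-- to clean, and compute each range from the slice lengths.
def pvBGo : List Char → List Char → List (Int × Int) → List Char × List (Int × Int)
  | cs, clean, ranges =>
    match ho : pvFindDD cs with
    | none => (clean ++ cs, ranges)
    | some o =>
        match hc : pvFindDD (cs.drop (o + 2)) with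
        | none => (clean ++ cs.take o ++ cs.drop (o + 2), ranges)
        | some c =>
            pvBGo ((cs.drop (o + 2)).drop (c + 2)) (clean ++ cs.take o ++ (cs.drop (o + 2)).take c)
              (ranges ++ [(((clean ++ cs.take o).length : Int), ((clean ++ cs.take o).length + c : Int))])
termination_by cs _ _ => cs.length
decreasing_by
  have h1 := pvFindDD_bound cs o ho
  have h2 := pvFindDD_bound _ _ hc
  simp at h2 ⊢; omega

def process_inline_formatting_py_alt (text : String) : String × (List (Int × Int)) :=
  let r := pvBGo text.toList [] []
  (String.ofList r.1, r.2)

-- ===== PRECONDITION & SPEC =====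
def Spec_process_inline_formatting_py (text : String) (out : String × (List (Int × Int))) : Prop := out = process_inline_formatting_py_alt text
instance (text : String) (out : String × (List (Int × Int))) : Decidable (Spec_process_inline_formatting_py text out) := by unfold Spec_process_inline_formatting_py; infer_instance

-- ===== CLAIM (what is proved, stated in full; the proofs are below) =====
def Claim_equal_process_inline_formatting_py : Prop := ∀ (text : String), Dom_process_inline_formatting_py text → Spec_process_inline_formatting_py text (process_inline_formatting_py text)

-- ===== LEMMAS AND PROOFS =====

theorem pvFindDD_drop : ∀ (cs : List Char) (o : Nat), pvFindDD cs = some o →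
    cs.drop o = '*' :: '*' :: cs.drop (o + 2)
  | c :: c2 :: rest, o => by
      simp only [pvFindDD]; split_ifs with h
      · intro h'; simp at h'; subst h'; simp [h.1, h.2]
      · intro h'; simp at h'; obtain ⟨k, hk, rfl⟩ := h'
        simpa using pvFindDD_drop (c2 :: rest) k hk
  | [c], o => by intro h; simp [pvFindDD] at h
  | [], o => by intro h; simp [pvFindDD] at h

theorem pvAInner_none : ∀ (cs clean : List Char), pvFindDD cs = none →
    pvAInner cs clean = (clean ++ cs, [], false)
  | c :: c2 :: rest, clean => by
      simp only [pvFindDD, pvAInner]; split_ifs with h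
      · simp
      · intro h'; simp at h'
        rw [pvAInner_none (c2 :: rest) (clean ++ [c]) h']; simp
  | [c], clean => by simp [pvFindDD, pvAInner]
  | [], clean => by simp [pvFindDD, pvAInner]

theorem pvAInner_some : ∀ (cs clean : List Char) (k : Nat), pvFindDD cs = some k →
    pvAInner cs clean = (clean ++ cs.take k, cs.drop (k + 2), true)
  | c :: c2 :: rest, clean, k => by
      simp only [pvFindDD, pvAInner]; split_ifs with h
      · intro h'; simp at h'; subst h'; simp
      · intro h'; simp at h'; obtain ⟨j, hj, rfl⟩ := h'
        rw [pvAInner_some (c2 :: rest) (clean ++ [c]) j hj]; simp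
  | [c], clean, k => by intro h; simp [pvFindDD] at h
  | [], clean, k => by intro h; simp [pvFindDD] at h

theorem pvAOuter_none : ∀ (cs clean : List Char) (ranges : List (Int × Int)),
    pvFindDD cs = none → pvAOuter cs clean ranges = (clean ++ cs, ranges)
  | c :: c2 :: rest, clean, ranges => by
      simp only [pvFindDD, pvAOuter]; split_ifs with h
      · simp
      · intro h'; simp at h'
        rw [pvAOuter_none (c2 :: rest) (clean ++ [c]) ranges h']; simp
  | [c], clean, ranges => by simp [pvFindDD, pvAOuter]
  | [], clean, ranges => by simp [pvAOuter]

theorem pvAOuter_advance : ∀ (cs clean : List Char) (ranges : List (Int × Int)) (o : Nat),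
    pvFindDD cs = some o →
    pvAOuter cs clean ranges = pvAOuter (cs.drop o) (clean ++ cs.take o) ranges
  | c :: c2 :: rest, clean, ranges, o => by
      simp only [pvFindDD]; split_ifs with h
      · intro h'; simp at h'; subst h'; simp
      · intro h'; simp at h'; obtain ⟨j, hj, rfl⟩ := h'
        simp only [pvAOuter]; rw [if_neg h]
        rw [pvAOuter_advance (c2 :: rest) (clean ++ [c]) ranges j hj]; simp
  | [c], clean, ranges, o => by intro h; simp [pvFindDD] at h
  | [], clean, ranges, o => by intro h; simp [pvFindDD] at h

theorem pvBGo_none (cs clean : List Char) (ranges : List (Int × Int))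
    (h : pvFindDD cs = none) : pvBGo cs clean ranges = (clean ++ cs, ranges) := by
  rw [pvBGo]; split <;> simp_all

theorem pvBGo_close_none (cs clean : List Char) (ranges : List (Int × Int)) (o : Nat)
    (h1 : pvFindDD cs = some o) (h2 : pvFindDD (cs.drop (o + 2)) = none) :
    pvBGo cs clean ranges = (clean ++ cs.take o ++ cs.drop (o + 2), ranges) := by
  rw [pvBGo]
  split
  · simp_all
  · rename_i o' ho'
    rw [h1] at ho'; injection ho' with ho'; subst ho'
    split <;> simp_all

theorem pvBGo_step (cs clean : List Char) (ranges : List (Int × Int)) (o c : Nat)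
    (h1 : pvFindDD cs = some o) (h2 : pvFindDD (cs.drop (o + 2)) = some c) :
    pvBGo cs clean ranges =
      pvBGo ((cs.drop (o + 2)).drop (c + 2)) (clean ++ cs.take o ++ (cs.drop (o + 2)).take c)
        (ranges ++ [(((clean ++ cs.take o).length : Int), (((clean ++ cs.take o).length : Int) + (c : Int)))]) := by
  rw [pvBGo]
  split
  · simp_all
  · rename_i o' ho'
    rw [h1] at ho'; injection ho' with ho'; subst ho'
    split
    · simp_all
    · rename_i c' hc'
      rw [h2] at hc'; injection hc' with hc'; subst hc'
      rfl

theorem pv_main (n : Nat) : ∀ (cs clean : List Char) (ranges : List (Int × Int)),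
    cs.length ≤ n → pvAOuter cs clean ranges = pvBGo cs clean ranges := by
  induction n with
  | zero =>
      intro cs clean ranges h
      have hnil : cs = [] := List.eq_nil_of_length_eq_zero (by omega)
      subst hnil
      rw [pvBGo_none [] clean ranges (by simp [pvFindDD])]; simp [pvAOuter]
  | succ n ih =>
      intro cs clean ranges hlen
      cases ho : pvFindDD cs with
      | none =>
          rw [pvAOuter_none cs clean ranges ho, pvBGo_none cs clean ranges ho]
      | some o =>
          have hb := pvFindDD_bound cs o ho
          rw [pvAOuter_advance cs clean ranges o ho, pvFindDD_drop cs o ho]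
          simp only [pvAOuter, and_self, if_true]
          cases hc : pvFindDD (cs.drop (o + 2)) with
          | none =>
              rw [pvAInner_none _ _ hc]
              rw [pvBGo_close_none cs clean ranges o ho hc]
          | some c =>
              have hb2 := pvFindDD_bound _ _ hc
              rw [pvAInner_some _ _ c hc]
              simp only
              rw [pvBGo_step cs clean ranges o c ho hc]
              have htk : ((cs.drop (o + 2)).take c).length = c := by
                simp at hb2 ⊢; omega
              have hlens : ((cs.drop (o + 2)).drop (c + 2)).length ≤ n := by
                simp at hb2 ⊢; omega
              rw [ih _ _ _ hlens]
              have hcast : (((clean ++ cs.take o) ++ (cs.drop (o + 2)).take c).length : Int)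
                  = (((clean ++ cs.take o).length : Int)) + (c : Int) := by
                simp [htk]; ring
              simp only [List.append_assoc] at hcast ⊢
              rw [hcast]

-- ===== VERDICT (by name: the statement is the Claim_ definition above) =====
theorem process_inline_formatting_py_spec : Claim_equal_process_inline_formatting_py := by
  intro text _
  unfold Spec_process_inline_formatting_py process_inline_formatting_py process_inline_formatting_py_alt
  rw [pv_main text.toList.length _ _ _ (le_refl _)]
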